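-- pv_equiv track=rewrite | github.com/lwgray/pm-agent | src/telemetry/strategic_collector.py | _identify_warning_signals
-- ===== SOURCE A (Python) =====
-- from typing import Dict, Any, List, Optional, Tuple
--
-- def _identify_warning_signals(history: List[Dict[str, Any]]) -> List[str]:
--     """Identify early warning signals from history"""
--     signals = []
--
--     # Look for common warning patterns
--     for record in history[-5:]:  # Last 5 records
--         if record.get('blocked_tasks', 0) > 3:
--             signals.append("high_blocked_tasks")
--         if record.get('overdue_tasks', 0) > 2:
--             signals.append("overdue_accumulation")
--         if record.get('team_velocity', 0) < 2:
--             signals.append("low_velocity")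
--
--     return list(set(signals))  # Remove duplicates
-- ===== SOURCE B (Python) =====
-- def _identify_warning_signals(history):
--     """Identify early warning signals from history.
--
--     Transposed scan: instead of walking records and appending per-record
--     signals (then deduplicating), each signal is decided independently by
--     one any() pass over the recent window, so no dedup step is needed.
--     """
--     recent = history[-5:]
--     signals = set()
--     if any(r.get('blocked_tasks', 0) > 3 for r in recent):
--         signals.add("high_blocked_tasks")
--     if any(r.get('overdue_tasks', 0) > 2 for r in recent):
--         signals.add("overdue_accumulation")
--     if any(r.get('team_velocity', 0) < 2 for r in recent):
--         signals.add("low_velocity")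
--     return list(signals)
-- ===== Notes on version B (the rewrite author's own statement) =====
-- stated objective: idiomatic
-- what changed: Transposes the scan: A loops record-outer (appending every triggered signal per record, then list(set(...)) to deduplicate), B loops condition-outer — one any() pass over history[-5:] per signal, adding each signal at most once to a set, so the per-record accumulator and the dedup step disappear; both return a list of the same set of signals (hash iteration order).
import Mathlib
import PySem

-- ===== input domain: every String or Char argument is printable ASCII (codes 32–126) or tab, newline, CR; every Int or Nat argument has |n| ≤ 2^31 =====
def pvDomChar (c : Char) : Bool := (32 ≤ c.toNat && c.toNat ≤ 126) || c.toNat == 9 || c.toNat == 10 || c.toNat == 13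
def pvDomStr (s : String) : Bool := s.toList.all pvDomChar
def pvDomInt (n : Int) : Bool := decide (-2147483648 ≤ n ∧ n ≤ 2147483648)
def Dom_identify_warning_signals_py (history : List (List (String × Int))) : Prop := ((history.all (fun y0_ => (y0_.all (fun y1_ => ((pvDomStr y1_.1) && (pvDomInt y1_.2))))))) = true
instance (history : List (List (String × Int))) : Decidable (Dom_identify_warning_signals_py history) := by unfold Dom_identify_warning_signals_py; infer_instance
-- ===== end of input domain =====

-- B transposes A's record-outer scan (append per-record signals, then dedup) into three
-- condition-outer any() passes that each add one signal at most once (idiomatic; no dedup step).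


-- ===== PORT A =====
-- loop over history[-5:] appending signal strings, then list(set(signals)).
-- list(set(...))'s hash iteration order is not modelled by PySem; since signals can only
-- contain these three strings, both ports list the distinct signals in the same fixed
-- order (blocked, overdue, velocity) — a canonical stand-in for the unspecified hash order.
def pvAStep (signals : List String) (record : List (String × Int)) : List String :=
  let signals :=
    if 3 < PySem.Dict.getD (PySem.Dict.mk record) "blocked_tasks" 0 then
      signals ++ ["high_blocked_tasks"] else signals
  let signals :=
    if 2 < PySem.Dict.getD (PySem.Dict.mk record) "overdue_tasks" 0 then
      signals ++ ["overdue_accumulation"] else signals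
  if PySem.Dict.getD (PySem.Dict.mk record) "team_velocity" 0 < 2 then
    signals ++ ["low_velocity"] else signals

def identify_warning_signals_py (history : List (List (String × Int))) : List String :=
  let signals := (PySem.List.slice history (some (-5)) none).foldl pvAStep []
  -- list(set(signals)) in the canonical signal order
  ["high_blocked_tasks", "overdue_accumulation", "low_velocity"].filter
    (fun x => signals.contains x)

-- ===== PORT B =====
-- recent = history[-5:]; one any() pass per signal; set built by conditional adds;
-- list(signals) returns the set's elements (same canonical order as in port A).
def identify_warning_signals_py_alt (history : List (List (String × Int))) : List String :=
  let recent := PySem.List.slice history (some (-5)) none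
  let s : PySem.Set String := PySem.Set.empty
  let s := if recent.any (fun r => 3 < PySem.Dict.getD (PySem.Dict.mk r) "blocked_tasks" 0)
           then PySem.Set.add s "high_blocked_tasks" else s
  let s := if recent.any (fun r => 2 < PySem.Dict.getD (PySem.Dict.mk r) "overdue_tasks" 0)
           then PySem.Set.add s "overdue_accumulation" else s
  if recent.any (fun r => PySem.Dict.getD (PySem.Dict.mk r) "team_velocity" 0 < 2)
  then PySem.Set.add s "low_velocity" else s

-- ===== PRECONDITION & SPEC =====
def Spec_identify_warning_signals_py (history : List (List (String × Int))) (out : List String) : Prop := out = identify_warning_signals_py_alt history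
instance (history : List (List (String × Int))) (out : List String) : Decidable (Spec_identify_warning_signals_py history out) := by unfold Spec_identify_warning_signals_py; infer_instance

-- ===== CLAIM (what is proved, stated in full; the proofs are below) =====
def Claim_equal_identify_warning_signals_py : Prop := ∀ (history : List (List (String × Int))), Dom_identify_warning_signals_py history → Spec_identify_warning_signals_py history (identify_warning_signals_py history)

-- ===== LEMMAS AND PROOFS =====

-- the signals one record contributes in A's loop
def pvSigOf (record : List (String × Int)) : List String :=
  (if 3 < PySem.Dict.getD (PySem.Dict.mk record) "blocked_tasks" 0 then ["high_blocked_tasks"] else []) ++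
  (if 2 < PySem.Dict.getD (PySem.Dict.mk record) "overdue_tasks" 0 then ["overdue_accumulation"] else []) ++
  (if PySem.Dict.getD (PySem.Dict.mk record) "team_velocity" 0 < 2 then ["low_velocity"] else [])

theorem pv_step_eq (acc : List String) (record : List (String × Int)) :
    pvAStep acc record = acc ++ pvSigOf record := by
  unfold pvAStep pvSigOf
  split_ifs <;> simp

theorem pv_scan_eq (recent : List (List (String × Int))) :
    recent.foldl pvAStep [] = recent.flatMap pvSigOf := by
  refine (PySem.List.foldl_congr_mem recent pvAStep (fun acc x => acc ++ pvSigOf x) []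
    (fun acc x _ => pv_step_eq acc x)).trans ?_
  simpa using PySem.List.foldl_append_eq_flatMap pvSigOf recent []

theorem pv_mem_sig_blocked (recent : List (List (String × Int))) :
    ("high_blocked_tasks" ∈ recent.flatMap pvSigOf)
      ↔ recent.any (fun r => 3 < PySem.Dict.getD (PySem.Dict.mk r) "blocked_tasks" 0) := by
  simp only [List.mem_flatMap, List.any_eq_true, decide_eq_true_eq]
  refine ⟨fun ⟨r, hr, hm⟩ => ⟨r, hr, ?_⟩, fun ⟨r, hr, hc⟩ => ⟨r, hr, ?_⟩⟩
  · unfold pvSigOf at hm; split_ifs at hm <;> simp_all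
  · unfold pvSigOf; simp [hc]

theorem pv_mem_sig_overdue (recent : List (List (String × Int))) :
    ("overdue_accumulation" ∈ recent.flatMap pvSigOf)
      ↔ recent.any (fun r => 2 < PySem.Dict.getD (PySem.Dict.mk r) "overdue_tasks" 0) := by
  simp only [List.mem_flatMap, List.any_eq_true, decide_eq_true_eq]
  refine ⟨fun ⟨r, hr, hm⟩ => ⟨r, hr, ?_⟩, fun ⟨r, hr, hc⟩ => ⟨r, hr, ?_⟩⟩
  · unfold pvSigOf at hm; split_ifs at hm <;> simp_all
  · unfold pvSigOf; split_ifs <;> simp_all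

theorem pv_mem_sig_velocity (recent : List (List (String × Int))) :
    ("low_velocity" ∈ recent.flatMap pvSigOf)
      ↔ recent.any (fun r => PySem.Dict.getD (PySem.Dict.mk r) "team_velocity" 0 < 2) := by
  simp only [List.mem_flatMap, List.any_eq_true, decide_eq_true_eq]
  refine ⟨fun ⟨r, hr, hm⟩ => ⟨r, hr, ?_⟩, fun ⟨r, hr, hc⟩ => ⟨r, hr, ?_⟩⟩
  · unfold pvSigOf at hm; split_ifs at hm <;> simp_all
  · unfold pvSigOf; split_ifs <;> simp_all

-- Bool forms of the membership lemmas, usable under the filter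
theorem pv_contains_blocked (recent : List (List (String × Int))) :
    (recent.flatMap pvSigOf).contains "high_blocked_tasks"
      = recent.any (fun r => 3 < PySem.Dict.getD (PySem.Dict.mk r) "blocked_tasks" 0) := by
  rw [Bool.eq_iff_iff]
  simpa using pv_mem_sig_blocked recent

theorem pv_contains_overdue (recent : List (List (String × Int))) :
    (recent.flatMap pvSigOf).contains "overdue_accumulation"
      = recent.any (fun r => 2 < PySem.Dict.getD (PySem.Dict.mk r) "overdue_tasks" 0) := by
  rw [Bool.eq_iff_iff]
  simpa using pv_mem_sig_overdue recent

theorem pv_contains_velocity (recent : List (List (String × Int))) :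
    (recent.flatMap pvSigOf).contains "low_velocity"
      = recent.any (fun r => PySem.Dict.getD (PySem.Dict.mk r) "team_velocity" 0 < 2) := by
  rw [Bool.eq_iff_iff]
  simpa using pv_mem_sig_velocity recent

-- ===== VERDICT (by name: the statement is the Claim_ definition above) =====
theorem identify_warning_signals_py_spec : Claim_equal_identify_warning_signals_py := by
  intro history _
  show identify_warning_signals_py history = identify_warning_signals_py_alt history
  unfold identify_warning_signals_py identify_warning_signals_py_alt
  set recent := PySem.List.slice history (some (-5)) none with hrec
  rw [pv_scan_eq]
  cases h1 : recent.any (fun r => 3 < PySem.Dict.getD (PySem.Dict.mk r) "blocked_tasks" 0) <;>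
  cases h2 : recent.any (fun r => 2 < PySem.Dict.getD (PySem.Dict.mk r) "overdue_tasks" 0) <;>
  cases h3 : recent.any (fun r => PySem.Dict.getD (PySem.Dict.mk r) "team_velocity" 0 < 2) <;>
    simp only [List.filter, pv_contains_blocked recent, pv_contains_overdue recent,
      pv_contains_velocity recent, h1, h2, h3] <;>
    simp [PySem.Set.empty, PySem.Set.add]
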